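-- pv_equiv track=rewrite | github.com/khongorzulkhenchbish/algorithms-and-data-structure | 1544_make_the_string_great.py | makeGoodWithoutStack
-- ===== SOURCE A (Python) =====
-- def makeGoodWithoutStack(s: str) -> str:
--     i = 0
--     while i < len(s) - 1:
--         if abs(ord(s[i]) - ord(s[i + 1])) == 32:
--             s = s[:i] + s[i + 2:]  # Remove the bad pair
--             i = max(i - 1, 0)  # Move back to check for new pairs
--         else:
--             i += 1
--     return s
-- ===== SOURCE B (Python) =====
-- def makeGoodWithoutStack(s: str) -> str:
--     stack = []
--     for c in s:
--         if stack and abs(ord(stack[-1]) - ord(c)) == 32: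
--             stack.pop()
--         else:
--             stack.append(c)
--     return "".join(stack)
-- ===== Notes on version B (the rewrite author's own statement) =====
-- stated objective: faster
-- what changed: Replaced the backtracking index scan with repeated string re-slicing by a single left-to-right pass over the characters maintaining a stack, popping when the top and the current character differ by 32.
import Mathlib
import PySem

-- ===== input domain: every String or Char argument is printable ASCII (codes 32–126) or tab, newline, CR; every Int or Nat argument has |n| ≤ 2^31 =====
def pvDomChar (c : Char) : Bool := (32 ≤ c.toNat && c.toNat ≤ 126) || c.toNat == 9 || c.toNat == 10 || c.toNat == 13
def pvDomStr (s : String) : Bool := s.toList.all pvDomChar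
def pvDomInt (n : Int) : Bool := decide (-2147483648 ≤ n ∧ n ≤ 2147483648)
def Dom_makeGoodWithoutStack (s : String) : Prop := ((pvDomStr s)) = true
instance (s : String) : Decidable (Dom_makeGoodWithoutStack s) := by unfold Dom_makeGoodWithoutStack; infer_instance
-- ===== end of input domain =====

set_option maxRecDepth 4000


-- B replaces A's backtracking index scan with string re-slicing by one linear stack pass (objective: faster, O(n) vs O(n^2)).

-- abs(ord(a) - ord(b)) == 32, shared character test of both versions
def pvBad (a b : Char) : Bool := ((a.toNat : Int) - (b.toNat : Int)).natAbs == 32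

-- ===== PORT A =====
-- A's while loop: index i over the current string l; on a bad pair remove it (s[:i] + s[i+2:]) and step back, else advance.
def pvLoopA (l : List Char) (i : Nat) : List Char :=
  if _h : i + 1 < l.length then
    if pvBad (l.getD i default) (l.getD (i + 1) default) then
      pvLoopA (l.take i ++ l.drop (i + 2)) (i - 1)
    else
      pvLoopA l (i + 1)
  else l
termination_by 2 * l.length - i
decreasing_by
  · simp only [List.length_append, List.length_take, List.length_drop]; omega
  · omega

def makeGoodWithoutStack (s : String) : String := String.mk (pvLoopA s.toList 0)

-- ===== PORT B =====
-- one step of B's loop: pop when the stack top and c are a bad pair, else push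
def pvStep (st : List Char) (c : Char) : List Char :=
  match st with
  | [] => [c]
  | t :: rest => if pvBad t c then rest else c :: t :: rest

def makeGoodWithoutStack_alt (s : String) : String :=
  String.mk ((s.toList.foldl pvStep []).reverse)

-- ===== PRECONDITION & SPEC =====
def Spec_makeGoodWithoutStack (s : String) (out : String) : Prop := out = makeGoodWithoutStack_alt s
instance (s : String) (out : String) : Decidable (Spec_makeGoodWithoutStack s out) := by unfold Spec_makeGoodWithoutStack; infer_instance

-- ===== CLAIM (what is proved, stated in full; the proofs are below) =====
def Claim_equal_makeGoodWithoutStack : Prop := ∀ (s : String), Dom_makeGoodWithoutStack s → Spec_makeGoodWithoutStack s (makeGoodWithoutStack s)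

-- ===== LEMMAS AND PROOFS =====

-- invariant of A's loop: no bad pair among the first i+1 characters
def pvInv (l : List Char) (i : Nat) : Prop :=
  ∀ j : Nat, j + 1 ≤ i → ∀ (h : j + 1 < l.length), pvBad (l[j]'(by omega)) (l[j+1]'h) = false

lemma pvStep_nil (c : Char) : pvStep [] c = [c] := rfl

lemma pvStep_cons (t : Char) (rest : List Char) (c : Char) :
    pvStep (t :: rest) c = if pvBad t c then rest else c :: t :: rest := rfl

lemma pvRevTake (l : List Char) (j : Nat) (h : j < l.length) :
    (l.take (j+1)).reverse = l[j] :: (l.take j).reverse := by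
  rw [List.take_add_one, List.getElem?_eq_getElem h]
  simp only [Option.toList_some, List.reverse_append, List.reverse_cons, List.reverse_nil,
    List.nil_append, List.singleton_append]

lemma pvStep_take (l : List Char) (i : Nat) (hi : i < l.length) (hinv : pvInv l i) :
    pvStep (l.take i).reverse (l[i]) = (l.take (i+1)).reverse := by
  rw [pvRevTake l i hi]
  cases i with
  | zero => simp only [List.take_zero, List.reverse_nil, pvStep_nil]
  | succ j =>
      have hj : j < l.length := by omega
      rw [pvRevTake l j hj]
      have hb : pvBad (l[j]'hj) (l[j+1]'hi) = false := hinv j (by omega) hi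
      simp [pvStep_cons, hb]

lemma pvLoopA_eq : ∀ (l : List Char) (i : Nat), pvInv l i →
    pvLoopA l i = ((l.drop i).foldl pvStep (l.take i).reverse).reverse := by
  intro l i
  induction l, i using pvLoopA.induct with
  | case1 l i h hb ih =>
      -- bad pair at (i, i+1): A removes it; B's fold pushes l[i] then pops it
      intro hinv
      have hi : i < l.length := by omega
      rw [pvLoopA]
      rw [dif_pos h, if_pos hb]
      rw [List.getD_eq_getElem l default hi, List.getD_eq_getElem l default h] at hb
      cases i with
      | zero =>
          cases l with
          | nil => simp at h
          | cons a l1 =>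
            cases l1 with
            | nil => simp at h
            | cons b t =>
              have hinv' : pvInv (List.take 0 (a::b::t) ++ List.drop (0+2) (a::b::t)) (0-1) := by
                intro j hj _; omega
              rw [ih hinv']
              simp only [List.getElem_cons_zero, List.getElem_cons_succ] at hb
              simp [pvStep_nil, pvStep_cons, hb]
      | succ j =>
          have hj : j < l.length := by omega
          simp only [show j+1-1 = j by omega, show j+1+2 = j+3 by omega] at ih ⊢
          have hlt : (l.take (j+1)).length = j + 1 := by simp; omega
          have htke : l.take (j+1) = l.take j ++ [l[j]] := by
            rw [List.take_add_one, List.getElem?_eq_getElem hj]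
            rfl
          have htk : (l.take (j+1) ++ l.drop (j+3)).take j = l.take j := by
            rw [List.take_append_of_le_length (by omega), List.take_take]
            congr 1; omega
          have hdp : (l.take (j+1) ++ l.drop (j+3)).drop j = l[j] :: l.drop (j+3) := by
            rw [List.drop_append, hlt]
            rw [htke, List.drop_append]
            simp [List.drop_eq_nil_of_le, show j - min j l.length = 0 by omega]
          have hinv' : pvInv (l.take (j+1) ++ l.drop (j+3)) j := by
            intro k hk hkl
            have hk1 : k < (l.take (j+1)).length := by omega
            have hk2 : k + 1 < (l.take (j+1)).length := by omega
            rw [List.getElem_append_left hk1, List.getElem_append_left hk2,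
              List.getElem_take, List.getElem_take]
            exact hinv k (by omega) (by omega)
          rw [ih hinv']
          congr 1
          -- left side: fold over the shortened string from position j
          rw [htk, hdp]
          simp only [List.foldl_cons]
          rw [pvStep_take l j hj (fun k hk hh => hinv k (by omega) hh)]
          -- right side: fold over l from position j+1 pushes l[j+1] and pops it on l[j+2]
          rw [List.drop_eq_getElem_cons hi, List.drop_eq_getElem_cons h]
          simp only [List.foldl_cons]
          rw [pvStep_take l (j+1) hi hinv, pvRevTake l (j+1) hi]
          simp [pvStep_cons, hb]
  | case2 l i h hb ih =>
      -- good pair: A advances i; B's fold pushes l[i]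
      intro hinv
      have hi : i < l.length := by omega
      rw [pvLoopA]
      rw [dif_pos h, if_neg hb]
      rw [List.getD_eq_getElem l default hi, List.getD_eq_getElem l default h] at hb
      have hbE : pvBad (l[i]'hi) (l[i+1]'h) = false := by
        simpa using hb
      have hinv' : pvInv l (i+1) := by
        intro j hj hjl
        rcases Nat.lt_or_ge (j+1) (i+1) with hlt | hge
        · exact hinv j (by omega) hjl
        · have hji : j = i := by omega
          subst hji; exact hbE
      rw [ih hinv']
      congr 1
      rw [List.drop_eq_getElem_cons hi]
      simp only [List.foldl_cons]
      rw [pvStep_take l i hi hinv]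
  | case3 l i h =>
      -- loop exit: i + 1 ≥ length, the whole string is already reduced
      intro hinv
      rw [pvLoopA]
      rw [dif_neg h]
      by_cases hi : i < l.length
      · have hdrop : l.drop i = [l[i]] := by
          rw [List.drop_eq_getElem_cons hi, List.drop_eq_nil_of_le (by omega)]
        rw [hdrop]
        simp only [List.foldl_cons, List.foldl_nil]
        rw [pvStep_take l i hi hinv]
        rw [List.take_of_length_le (by omega), List.reverse_reverse]
      · rw [List.drop_eq_nil_of_le (by omega), List.take_of_length_le (by omega)]
        simp

lemma pv_main (l : List Char) : pvLoopA l 0 = (l.foldl pvStep []).reverse := by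
  have := pvLoopA_eq l 0 (by intro j hj _; omega)
  simpa using this

-- ===== VERDICT (by name: the statement is the Claim_ definition above) =====
theorem makeGoodWithoutStack_spec : Claim_equal_makeGoodWithoutStack := by
  intro s _
  unfold Spec_makeGoodWithoutStack makeGoodWithoutStack makeGoodWithoutStack_alt
  rw [pv_main]
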